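-- pv_equiv track=rewrite | github.com/ccantynz-alt/BookARide | v2/backend/app/core/database.py | _apply_sort
-- ===== SOURCE A (Python) =====
-- def _apply_sort(docs, sort_spec):
--     import functools
--     def compare(a, b):
--         for field, direction in sort_spec.items():
--             va = a.get(field)
--             vb = b.get(field)
--             if va == vb:
--                 continue
--             if va is None:
--                 return 1 * direction
--             if vb is None:
--                 return -1 * direction
--             if va < vb:
--                 return -1 * direction
--             return 1 * direction
--         return 0
--     return sorted(docs, key=functools.cmp_to_key(compare))
-- ===== SOURCE B (Python) =====
-- def _apply_sort(docs, sort_spec):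
--     result = list(docs)
--     for field, direction in reversed(list(sort_spec.items())):
--         result = sorted(result,
--                         key=lambda d: (d.get(field) is None, d.get(field) or 0),
--                         reverse=direction < 0)
--     return result
-- ===== Notes on version B (the rewrite author's own statement) =====
-- stated objective: idiomatic
-- what changed: A sorts once with functools.cmp_to_key over a hand-written multi-field comparator; B instead runs a sequence of stable key-sorts, one per field in reverse spec order, with key (value is None, value) and reverse=direction<0. Pre_ excludes specs with a direction-0 field on which the documents disagree: there A's comparator is non-transitive and its result is an accident of the sort algorithm.
-- outside the precondition, e.g. on _apply_sort([{'a': 2}, {'a': 1}], {'a': 0}): A returns [{'a': 2}, {'a': 1}], B returns [{'a': 1}, {'a': 2}]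
import Mathlib
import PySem

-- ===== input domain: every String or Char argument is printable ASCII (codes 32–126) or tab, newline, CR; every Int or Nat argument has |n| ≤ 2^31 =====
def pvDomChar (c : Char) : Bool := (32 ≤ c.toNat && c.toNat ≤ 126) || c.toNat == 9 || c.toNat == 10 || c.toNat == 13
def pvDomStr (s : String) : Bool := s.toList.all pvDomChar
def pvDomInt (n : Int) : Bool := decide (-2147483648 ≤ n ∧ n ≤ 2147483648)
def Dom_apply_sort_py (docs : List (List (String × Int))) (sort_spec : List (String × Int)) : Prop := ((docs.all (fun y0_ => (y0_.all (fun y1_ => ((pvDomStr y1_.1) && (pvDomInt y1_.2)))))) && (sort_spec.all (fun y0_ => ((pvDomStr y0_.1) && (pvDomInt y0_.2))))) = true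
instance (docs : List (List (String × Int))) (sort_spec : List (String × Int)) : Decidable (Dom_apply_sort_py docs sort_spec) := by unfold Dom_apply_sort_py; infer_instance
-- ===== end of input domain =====

-- B replaces A's comparator sort (functools.cmp_to_key over a hand-written multi-field compare)
-- by the idiomatic sequence of stable key-sorts, least-significant field first.

-- ===== PORT A =====
-- the inner 'compare(a, b)': loop over sort_spec.items(), one step per field
def pyCompare : List (String × Int) → List (String × Int) → List (String × Int) → Int
  | [], _, _ => 0
  | (field, direction) :: rest, a, b =>
    let va : Option Int := (PySem.Dict.mk a).get? field
    let vb : Option Int := (PySem.Dict.mk b).get? field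
    if va = vb then pyCompare rest a b
    else if va = none then 1 * direction
    else if vb = none then (-1) * direction
    else if va.getD 0 < vb.getD 0 then (-1) * direction   -- both are 'some' here: Python's va < vb
    else 1 * direction

-- sorted(docs, key=cmp_to_key(compare)): Python's stable sort with 'a before b iff compare(a,b) < 0',
-- i.e. PySem's stable-insertion model of sorted (cf. PySem.List.sorted_eq_foldl_insertBy); exact whenever
-- the comparator is a strict weak order, which Pre_ guarantees (all directions ≠ 0).
def apply_sort_py (docs : List (List (String × Int))) (sort_spec : List (String × Int)) : List (List (String × Int)) :=
  docs.foldl (fun acc x => PySem.List.insertBy (fun a b => decide (pyCompare sort_spec a b < 0)) x acc) []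

-- ===== PORT B =====
-- for field, direction in reversed(list(sort_spec.items())):
--     result = sorted(result, key=lambda d: (d.get(field) is None, d.get(field) or 0), reverse=direction < 0)
def apply_sort_py_alt (docs : List (List (String × Int))) (sort_spec : List (String × Int)) : List (List (String × Int)) :=
  sort_spec.reverse.foldl
    (fun result fd =>
      PySem.List.sorted2 result
        (fun d => ((PySem.Dict.mk d).get? fd.1).isNone)
        (fun d => (((PySem.Dict.mk d).get? fd.1).getD (0 : Int)))
        (decide (fd.2 < 0)))
    docs

-- ===== PRECONDITION & SPEC =====
-- Pre_ excludes sort specs containing a direction-0 field on which the documents actually disagree: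
-- there A's comparator is not transitive (two documents differing in that field compare "equal",
-- cutting off the later fields), so the order A returns is an accident of which pairs the sort
-- algorithm happens to compare (it may or may not coincide with B's); B sorts such a field ascending.
-- A direction-0 field on which every document carries the same value is a genuine no-op and stays inside.
def Pre_apply_sort_py (docs : List (List (String × Int))) (sort_spec : List (String × Int)) : Prop :=
  ∀ fd ∈ sort_spec, fd.2 ≠ 0 ∨
    ∀ d1 ∈ docs, ∀ d2 ∈ docs, (PySem.Dict.mk d1).get? fd.1 = (PySem.Dict.mk d2).get? fd.1
instance (docs : List (List (String × Int))) (sort_spec : List (String × Int)) : Decidable (Pre_apply_sort_py docs sort_spec) := by unfold Pre_apply_sort_py; infer_instance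

def pvWitness_apply_sort_py : (List (List (String × Int))) × (List (String × Int)) :=
  ([[("a", 1), ("b", 2)], [("a", 3)], [("b", 0)]], [("a", 1), ("b", -1)])

def Spec_apply_sort_py (docs : List (List (String × Int))) (sort_spec : List (String × Int)) (out : List (List (String × Int))) : Prop := out = apply_sort_py_alt docs sort_spec
instance (docs : List (List (String × Int))) (sort_spec : List (String × Int)) (out : List (List (String × Int))) : Decidable (Spec_apply_sort_py docs sort_spec out) := by unfold Spec_apply_sort_py; infer_instance

-- ===== CLAIM (what is proved, stated in full; the proofs are below) =====
def Claim_equal_apply_sort_py : Prop := ∀ (docs : List (List (String × Int))) (sort_spec : List (String × Int)), Dom_apply_sort_py docs sort_spec → Pre_apply_sort_py docs sort_spec → Spec_apply_sort_py docs sort_spec (apply_sort_py docs sort_spec)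

-- ===== LEMMAS AND PROOFS =====

-- generic stable-insertion-sort machinery
def pvSort {α : Type} (b : α → α → Bool) (l : List α) : List α :=
  l.foldl (fun acc x => PySem.List.insertBy b x acc) []

def pvFold {α : Type} (b : α → α → Bool) (v : List α) (acc : List α) : List α :=
  v.foldl (fun acc x => PySem.List.insertBy b x acc) acc

def pvLex {α κ : Type} [LinearOrder κ] (K : α → κ) (b2 : α → α → Bool) (a c : α) : Bool :=
  decide (K a < K c) || (decide (K a = K c) && b2 a c)

def pvBK {α κ : Type} [LinearOrder κ] (K : α → κ) (a c : α) : Bool := decide (K a < K c)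

lemma pvIns_cons {α : Type} (b : α → α → Bool) (x y : α) (ys : List α) :
    PySem.List.insertBy b x (y :: ys) = if b x y then x :: y :: ys else y :: PySem.List.insertBy b x ys := by
  simp [PySem.List.insertBy]

lemma pvIns_append_left {α : Type} (b : α → α → Bool) (x : α) (P R : List α)
    (hP : ∀ p ∈ P, b x p = false) :
    PySem.List.insertBy b x (P ++ R) = P ++ PySem.List.insertBy b x R := by
  induction P with
  | nil => rfl
  | cons p P ih =>
    have hp := hP p (by simp)
    simp [pvIns_cons, hp, ih (fun q hq => hP q (by simp [hq]))]

lemma pvIns_split {α : Type} (b : α → α → Bool) (x : α) :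
    ∀ ys : List α, ∃ P Q, ys = P ++ Q ∧ PySem.List.insertBy b x ys = P ++ x :: Q ∧
      (∀ p ∈ P, b x p = false) ∧ (∀ q, Q.head? = some q → b x q = true) := by
  intro ys
  induction ys with
  | nil => exact ⟨[], [], by simp, rfl, by simp, by simp⟩
  | cons y ys ih =>
    by_cases h : b x y = true
    · exact ⟨[], y :: ys, by simp, by simp [pvIns_cons, h], by simp, by simp [h]⟩
    · obtain ⟨P, Q, h1, h2, h3, h4⟩ := ih
      refine ⟨y :: P, Q, by simp [h1], ?_, ?_, h4⟩
      · simp [pvIns_cons, h, h2]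
      · intro p hp
        rcases List.mem_cons.mp hp with rfl | hp
        · simpa using h
        · exact h3 p hp

lemma pvIns_pairwise {α : Type} (b : α → α → Bool)
    (H0 : ∀ a c, b a c = true → b c a = false)
    (H1 : ∀ a c e, b a c = true → b e c = false → b a e = true)
    (x : α) : ∀ ys : List α, ys.Pairwise (fun y z => b z y = false) →
      (PySem.List.insertBy b x ys).Pairwise (fun y z => b z y = false) := by
  intro ys
  induction ys with
  | nil => intro _; show List.Pairwise _ [x]; simp
  | cons y ys ih =>
    intro hp
    rw [List.pairwise_cons] at hp
    by_cases h : b x y = true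
    · rw [pvIns_cons, if_pos h, List.pairwise_cons]
      refine ⟨?_, List.pairwise_cons.mpr hp⟩
      intro z hz
      rcases List.mem_cons.mp hz with rfl | hz
      · exact H0 x z h
      · -- z ∈ ys, y before z: b z y = false; if b z x then H1 gives b z y = true
        by_contra hzx
        have hzx' : b z x = true := by
          cases hbx : b z x
          · exact absurd hbx hzx
          · rfl
        have : b z y = true := H1 z x y hzx' (H0 x y h)
        rw [hp.1 z hz] at this
        exact Bool.false_ne_true this
    · rw [pvIns_cons, if_neg h, List.pairwise_cons]
      constructor
      · intro z hz
        rcases (PySem.List.mem_insertBy b x z ys).mp hz with rfl | hz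
        · simpa using h
        · exact hp.1 z hz
      · exact ih hp.2

lemma pvFold_pairwise {α : Type} (b : α → α → Bool)
    (H0 : ∀ a c, b a c = true → b c a = false)
    (H1 : ∀ a c e, b a c = true → b e c = false → b a e = true) :
    ∀ (v acc : List α), acc.Pairwise (fun y z => b z y = false) →
      (pvFold b v acc).Pairwise (fun y z => b z y = false) := by
  intro v
  induction v with
  | nil => intro acc h; exact h
  | cons w v ih =>
    intro acc h
    exact ih _ (pvIns_pairwise b H0 H1 w acc h)

lemma pvSort_pairwise {α : Type} (b : α → α → Bool)
    (H0 : ∀ a c, b a c = true → b c a = false)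
    (H1 : ∀ a c e, b a c = true → b e c = false → b a e = true)
    (l : List α) : (pvSort b l).Pairwise (fun y z => b z y = false) :=
  pvFold_pairwise b H0 H1 l [] (by simp)

lemma pvSort_mem {α : Type} (b : α → α → Bool) (l : List α) :
    ∀ y, y ∈ pvSort b l ↔ y ∈ l := by
  have key : ∀ (v acc : List α) (y : α), y ∈ pvFold b v acc ↔ y ∈ v ∨ y ∈ acc := by
    intro v
    induction v with
    | nil => simp [pvFold]
    | cons w v ih =>
      intro acc y
      show y ∈ pvFold b v (PySem.List.insertBy b w acc) ↔ _
      rw [ih, PySem.List.mem_insertBy]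
      simp [or_assoc, or_left_comm]
  intro y
  have := key l [] y
  simpa [pvSort, pvFold] using this

lemma pvFold_append {α : Type} (b : α → α → Bool) (u v : List α) (acc : List α) :
    pvFold b (u ++ v) acc = pvFold b v (pvFold b u acc) := by
  simp [pvFold, List.foldl_append]

lemma pvSort_append_singleton {α : Type} (b : α → α → Bool) (l : List α) (x : α) :
    pvSort b (l ++ [x]) = PySem.List.insertBy b x (pvSort b l) := by
  simp [pvSort, List.foldl_append]

-- the one-step commutation: inserting w by the primary key preserves the split 'P ++ x :: Q'
lemma pvStep {α κ : Type} [LinearOrder κ] (K : α → κ) (b2 : α → α → Bool) (x w : α)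
    (hw : K w = K x → b2 x w = true) :
    ∀ P Q : List α, (∀ p ∈ P, pvLex K b2 x p = false) → (∀ q ∈ Q, pvLex K b2 x q = true) →
    ∃ P' Q', PySem.List.insertBy (pvBK K) w (P ++ x :: Q) = P' ++ x :: Q' ∧
             PySem.List.insertBy (pvBK K) w (P ++ Q) = P' ++ Q' ∧
             (∀ p ∈ P', pvLex K b2 x p = false) ∧ (∀ q ∈ Q', pvLex K b2 x q = true) := by
  intro P
  induction P with
  | nil =>
    intro Q hP hQ
    by_cases h : K w < K x
    · refine ⟨[w], Q, ?_, ?_, ?_, hQ⟩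
      · simp [pvIns_cons, pvBK, h]
      · cases Q with
        | nil => rfl
        | cons q Q' =>
          have hq := hQ q (by simp)
          have hxq : K x ≤ K q := by
            rcases Bool.or_eq_true_iff.mp hq with h' | h'
            · exact le_of_lt (of_decide_eq_true h')
            · exact le_of_eq (of_decide_eq_true (Bool.and_eq_true_iff.mp h').1)
          simp [pvIns_cons, pvBK, lt_of_lt_of_le h hxq]
      · intro p hp
        rcases List.mem_singleton.mp hp with rfl
        simp [pvLex, not_lt_of_gt h, ne_of_gt h]
    · refine ⟨[], PySem.List.insertBy (pvBK K) w Q, ?_, by simp, by simp, ?_⟩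
      · simp [pvIns_cons, pvBK, h]
      · intro q hq
        rcases (PySem.List.mem_insertBy _ w q Q).mp hq with rfl | hq
        · rcases eq_or_lt_of_le (le_of_not_gt h) with heq | hlt
          · simp [pvLex, heq, hw heq.symm]
          · simp [pvLex, hlt]
        · exact hQ q hq
  | cons p P ih =>
    intro Q hP hQ
    have hp := hP p (by simp)
    have hpx : K p ≤ K x := by
      by_contra hc
      have : pvLex K b2 x p = true := by simp [pvLex, lt_of_not_ge hc]
      rw [hp] at this; exact Bool.false_ne_true this
    by_cases h : K w < K p
    · refine ⟨w :: p :: P, Q, ?_, ?_, ?_, hQ⟩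
      · simp [pvIns_cons, pvBK, h]
      · simp [pvIns_cons, pvBK, h]
      · intro q hq
        rcases List.mem_cons.mp hq with rfl | hq
        · have : K q < K x := lt_of_lt_of_le h hpx
          simp [pvLex, not_lt_of_gt this, ne_of_gt this]
        · exact hP q hq
    · obtain ⟨P', Q', h1, h2, h3, h4⟩ := ih Q (fun q hq => hP q (by simp [hq])) hQ
      refine ⟨p :: P', Q', ?_, ?_, ?_, h4⟩
      · simp [pvIns_cons, pvBK, h, h1]
      · simp [pvIns_cons, pvBK, h, h2]
      · intro q hq
        rcases List.mem_cons.mp hq with rfl | hq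
        · exact hp
        · exact h3 q hq

-- folding inserts-by-primary-key over v commutes with the pending lexicographic insert of x
lemma pvComm {α κ : Type} [LinearOrder κ] (K : α → κ) (b2 : α → α → Bool) (x : α) :
    ∀ v P Q : List α, (∀ p ∈ P, pvLex K b2 x p = false) → (∀ q ∈ Q, pvLex K b2 x q = true) →
    (∀ w ∈ v, K w = K x → b2 x w = true) →
    pvFold (pvBK K) v (P ++ x :: Q) = PySem.List.insertBy (pvLex K b2) x (pvFold (pvBK K) v (P ++ Q)) := by
  intro v
  induction v with
  | nil =>
    intro P Q hP hQ _
    show P ++ x :: Q = PySem.List.insertBy (pvLex K b2) x (P ++ Q)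
    rw [pvIns_append_left _ _ _ _ hP]
    cases Q with
    | nil => rfl
    | cons q Q' => simp [pvIns_cons, hQ q (by simp)]
  | cons w v ih =>
    intro P Q hP hQ hv
    obtain ⟨P', Q', h1, h2, h3, h4⟩ := pvStep K b2 x w (hv w (by simp)) P Q hP hQ
    show pvFold (pvBK K) v (PySem.List.insertBy (pvBK K) w (P ++ x :: Q)) = _
    rw [h1, ih P' Q' h3 h4 (fun z hz => hv z (by simp [hz]))]
    congr 1
    rw [show pvFold (pvBK K) (w :: v) (P ++ Q) = pvFold (pvBK K) v (PySem.List.insertBy (pvBK K) w (P ++ Q)) from rfl, h2]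

-- MAIN: a stable sort by the lexicographic comparator equals a stable sort by the
-- primary key applied after a stable sort by the secondary comparator
lemma pvMain {α κ : Type} [LinearOrder κ] (K : α → κ) (b2 : α → α → Bool)
    (H0 : ∀ a c, b2 a c = true → b2 c a = false)
    (H1 : ∀ a c e, b2 a c = true → b2 e c = false → b2 a e = true) :
    ∀ l : List α, pvSort (pvLex K b2) l = pvSort (pvBK K) (pvSort b2 l) := by
  intro l
  induction l using List.reverseRecOn with
  | nil => rfl
  | append_singleton l x ih =>
    rw [pvSort_append_singleton, pvSort_append_singleton, ih]
    set m := pvSort b2 l with hm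
    obtain ⟨u, v, hsplit, hins, hu, hvhead⟩ := pvIns_split b2 x m
    -- upgrade the head hit to all of v, using that m is b2-sorted
    have hmpw : m.Pairwise (fun y z => b2 z y = false) := pvSort_pairwise b2 H0 H1 l
    have hv : ∀ y ∈ v, b2 x y = true := by
      cases v with
      | nil => simp
      | cons q0 v' =>
        have hq0 : b2 x q0 = true := hvhead q0 rfl
        intro y hy
        rcases List.mem_cons.mp hy with rfl | hy
        · exact hq0
        · have : (q0 :: v').Pairwise (fun y z => b2 z y = false) :=
            ((List.pairwise_append.mp (hsplit ▸ hmpw)).2.1)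
          exact H1 x q0 y hq0 ((List.pairwise_cons.mp this).1 y hy)
    rw [hins]
    -- pvSort bK (u ++ x :: v) = pvFold bK v (insert bK x (pvSort bK u))
    have e1 : pvSort (pvBK K) (u ++ x :: v)
        = pvFold (pvBK K) v (PySem.List.insertBy (pvBK K) x (pvSort (pvBK K) u)) := by
      show pvFold (pvBK K) (u ++ x :: v) [] = _
      rw [pvFold_append]
      rfl
    rw [e1]
    set Su := pvSort (pvBK K) u with hSu
    obtain ⟨P0, Q0, hS0, hins0, hP0b, hQ0head⟩ := pvIns_split (pvBK K) x Su
    have hSupw : Su.Pairwise (fun y z => pvBK K z y = false) := by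
      refine pvSort_pairwise (pvBK K) ?_ ?_ u
      · intro a c h; simp only [pvBK, decide_eq_true_eq] at h ⊢
        simp [not_lt_of_gt h]
      · intro a c e h1' h2'; simp only [pvBK, decide_eq_true_eq, decide_eq_false_iff_not] at h1' h2' ⊢
        exact lt_of_lt_of_le h1' (le_of_not_gt h2')
    have hP0 : ∀ p ∈ P0, pvLex K b2 x p = false := by
      intro p hp
      have hpu : p ∈ u := by
        have : p ∈ Su := hS0 ▸ List.mem_append_left Q0 hp
        exact (pvSort_mem (pvBK K) u p).mp this
      have h1' : ¬ K x < K p := by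
        have := hP0b p hp
        simpa [pvBK] using this
      simp [pvLex, h1', hu p hpu]
    have hQ0 : ∀ q ∈ Q0, pvLex K b2 x q = true := by
      cases Q0 with
      | nil => simp
      | cons q0 Q0' =>
        have hq0 : K x < K q0 := by
          have := hQ0head q0 rfl
          simpa [pvBK] using this
        intro q hq
        rcases List.mem_cons.mp hq with rfl | hq
        · simp [pvLex, hq0]
        · have hpwQ : (q0 :: Q0').Pairwise (fun y z => pvBK K z y = false) :=
            (List.pairwise_append.mp (hS0 ▸ hSupw)).2.1
          have : pvBK K q q0 = false := (List.pairwise_cons.mp hpwQ).1 q hq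
          have hle : K q0 ≤ K q := by
            simp only [pvBK, decide_eq_false_iff_not] at this
            exact le_of_not_gt this
          simp [pvLex, lt_of_lt_of_le hq0 hle]
    rw [hins0, pvComm K b2 x v P0 Q0 hP0 hQ0 (fun w hw _ => hv w hw)]
    congr 1
    rw [← hS0, hsplit]
    show pvFold (pvBK K) (u ++ v) [] = pvFold (pvBK K) v Su
    rw [pvFold_append]
    rfl

-- ===== comparator-specific lemmas =====

-- the per-field key: direction > 0 sorts (is-None, value) ascending; direction < 0 the reverse
def pvKey (field : String) (dir : Int) (d : List (String × Int)) : Lex (Bool × Int) :=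
  let v := (PySem.Dict.mk d).get? field
  if 0 < dir then toLex (v.isNone, v.getD 0) else toLex (!v.isNone, -(v.getD 0))

lemma pvBoolLex (x y : Bool) (u v : Int) :
    (decide (x < y) || (!decide (y < x) && decide (u < v))) = decide (toLex (x, u) < toLex (y, v)) := by
  cases x <;> cases y <;> simp [Prod.Lex.lt_iff]

lemma pvBoolLexRev (x y : Bool) (u v : Int) :
    (decide (y < x) || (!decide (x < y) && decide (v < u))) = decide (toLex (!x, -u) < toLex (!y, -v)) := by
  cases x <;> cases y <;> simp [Prod.Lex.lt_iff]

-- B's per-field pass is exactly the stable sort by pvKey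
lemma pvSorted2_before {α κ₁ κ₂ : Type} [LinearOrder κ₁] [LinearOrder κ₂]
    (xs : List α) (k1 : α → κ₁) (k2 : α → κ₂) (rev : Bool) :
    PySem.List.sorted2 xs k1 k2 rev
      = pvSort (if rev then (fun a b => (decide (k1 b < k1 a) || (!decide (k1 a < k1 b) && decide (k2 b < k2 a))))
                else (fun a b => (decide (k1 a < k1 b) || (!decide (k1 b < k1 a) && decide (k2 a < k2 b))))) xs := by
  cases rev <;> rfl

lemma pvSorted2_eq (f : String) (dval : Int) (hd : dval ≠ 0) (l : List (List (String × Int))) :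
    PySem.List.sorted2 l (fun d => ((PySem.Dict.mk d).get? f).isNone) (fun d => (((PySem.Dict.mk d).get? f).getD (0 : Int))) (decide (dval < 0))
      = pvSort (pvBK (pvKey f dval)) l := by
  rw [pvSorted2_before]
  rcases lt_or_gt_of_ne hd with hneg | hpos
  · rw [show (decide (dval < 0)) = true by simp [hneg]]
    have hfun : (fun (a b : List (String × Int)) =>
        (decide (((PySem.Dict.mk b).get? f).isNone < ((PySem.Dict.mk a).get? f).isNone) ||
          (!decide (((PySem.Dict.mk a).get? f).isNone < ((PySem.Dict.mk b).get? f).isNone) &&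
            decide ((((PySem.Dict.mk b).get? f).getD (0:Int)) < (((PySem.Dict.mk a).get? f).getD (0:Int))))))
        = pvBK (pvKey f dval) := by
      funext a b
      rw [pvBoolLexRev]
      simp [pvBK, pvKey, not_lt_of_gt hneg]
    show pvSort (fun (a b : List (String × Int)) =>
        (decide (((PySem.Dict.mk b).get? f).isNone < ((PySem.Dict.mk a).get? f).isNone) ||
          (!decide (((PySem.Dict.mk a).get? f).isNone < ((PySem.Dict.mk b).get? f).isNone) &&
            decide ((((PySem.Dict.mk b).get? f).getD (0:Int)) < (((PySem.Dict.mk a).get? f).getD (0:Int))))))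
        l = _
    rw [hfun]
  · rw [show (decide (dval < 0)) = false by simp [not_lt_of_gt hpos]]
    have hfun : (fun (a b : List (String × Int)) =>
        (decide (((PySem.Dict.mk a).get? f).isNone < ((PySem.Dict.mk b).get? f).isNone) ||
          (!decide (((PySem.Dict.mk b).get? f).isNone < ((PySem.Dict.mk a).get? f).isNone) &&
            decide ((((PySem.Dict.mk a).get? f).getD (0:Int)) < (((PySem.Dict.mk b).get? f).getD (0:Int))))))
        = pvBK (pvKey f dval) := by
      funext a b
      rw [pvBoolLex]
      simp [pvBK, pvKey, hpos]
    show pvSort (fun (a b : List (String × Int)) =>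
        (decide (((PySem.Dict.mk a).get? f).isNone < ((PySem.Dict.mk b).get? f).isNone) ||
          (!decide (((PySem.Dict.mk b).get? f).isNone < ((PySem.Dict.mk a).get? f).isNone) &&
            decide ((((PySem.Dict.mk a).get? f).getD (0:Int)) < (((PySem.Dict.mk b).get? f).getD (0:Int))))))
        l = _
    rw [hfun]

-- key equality is value equality
lemma pvKey_eq_iff (f : String) (dval : Int) (a b : List (String × Int)) :
    pvKey f dval a = pvKey f dval b ↔ (PySem.Dict.mk a).get? f = (PySem.Dict.mk b).get? f := by
  unfold pvKey
  rcases ha : (PySem.Dict.mk a).get? f with _ | va <;> rcases hb : (PySem.Dict.mk b).get? f with _ | vb <;>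
    split_ifs <;> simp

-- one comparator step is the lexicographic combination of the field key and the rest
lemma pvFieldIff (f : String) (dval : Int) (hd : dval ≠ 0) (rest : List (String × Int))
    (a b : List (String × Int)) :
    (pyCompare ((f, dval) :: rest) a b < 0 ↔
      (pvKey f dval a < pvKey f dval b ∨ (pvKey f dval a = pvKey f dval b ∧ pyCompare rest a b < 0))) := by
  rw [pvKey_eq_iff]
  show (if (PySem.Dict.mk a).get? f = (PySem.Dict.mk b).get? f then pyCompare rest a b
      else if (PySem.Dict.mk a).get? f = none then 1 * dval
      else if (PySem.Dict.mk b).get? f = none then (-1) * dval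
      else if ((PySem.Dict.mk a).get? f).getD 0 < ((PySem.Dict.mk b).get? f).getD 0 then (-1) * dval
      else 1 * dval) < 0 ↔ _
  by_cases heq : (PySem.Dict.mk a).get? f = (PySem.Dict.mk b).get? f
  · have hk : pvKey f dval a = pvKey f dval b := by simp [pvKey, heq]
    simp [heq, hk]
  · rw [if_neg heq]
    simp only [heq, false_and, or_false]
    rcases ha : (PySem.Dict.mk a).get? f with _ | va <;> rcases hb : (PySem.Dict.mk b).get? f with _ | vb
    · exact absurd (ha.trans hb.symm) heq
    · -- a missing, b present: compare returns 1 * dval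
      rcases lt_or_gt_of_ne hd with hneg | hpos
      · simp [pvKey, ha, hb, Prod.Lex.lt_iff, hneg, not_lt_of_gt hneg]
      · simp [pvKey, ha, hb, Prod.Lex.lt_iff, hpos, not_lt_of_gt hpos]
    · -- a present, b missing: compare returns -1 * dval
      rcases lt_or_gt_of_ne hd with hneg | hpos
      · simp [pvKey, ha, hb, Prod.Lex.lt_iff, not_lt_of_gt hneg]
      · simp [pvKey, ha, hb, Prod.Lex.lt_iff, hpos]
    · -- both present, different values
      have hne : va ≠ vb := by
        intro h; exact heq (ha.trans (h ▸ hb.symm))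
      rcases lt_or_gt_of_ne hd with hneg | hpos
      · simp [pvKey, ha, hb, Prod.Lex.lt_iff, not_lt_of_gt hneg]
        omega
      · simp [pvKey, ha, hb, Prod.Lex.lt_iff, hpos]
        omega

-- compare(b, a) = -compare(a, b)
lemma pvCmpNeg : ∀ (spec : List (String × Int)) (a b : List (String × Int)),
    pyCompare spec b a = - pyCompare spec a b := by
  intro spec
  induction spec with
  | nil => intro a b; simp [pyCompare]
  | cons fd rest ih =>
    intro a b
    obtain ⟨f, dval⟩ := fd
    show (if (PySem.Dict.mk b).get? f = (PySem.Dict.mk a).get? f then pyCompare rest b a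
        else if (PySem.Dict.mk b).get? f = none then 1 * dval
        else if (PySem.Dict.mk a).get? f = none then (-1) * dval
        else if ((PySem.Dict.mk b).get? f).getD 0 < ((PySem.Dict.mk a).get? f).getD 0 then (-1) * dval
        else 1 * dval)
      = - (if (PySem.Dict.mk a).get? f = (PySem.Dict.mk b).get? f then pyCompare rest a b
        else if (PySem.Dict.mk a).get? f = none then 1 * dval
        else if (PySem.Dict.mk b).get? f = none then (-1) * dval
        else if ((PySem.Dict.mk a).get? f).getD 0 < ((PySem.Dict.mk b).get? f).getD 0 then (-1) * dval
        else 1 * dval)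
    by_cases heq : (PySem.Dict.mk a).get? f = (PySem.Dict.mk b).get? f
    · rw [if_pos heq.symm, if_pos heq, ih a b]
    · rw [if_neg (fun h => heq h.symm), if_neg heq]
      rcases ha : (PySem.Dict.mk a).get? f with _ | va <;> rcases hb : (PySem.Dict.mk b).get? f with _ | vb
      · exact absurd (ha.trans hb.symm) heq
      · simp
      · simp
      · have hne : va ≠ vb := fun h => heq (ha.trans (h ▸ hb.symm))
        rcases lt_trichotomy va vb with h | h | h
        · simp [h, not_lt_of_gt h]
        · exact absurd h hne
        · simp [h, not_lt_of_gt h]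

-- transitivity-style property of the comparator (needs every direction ≠ 0)
lemma pvCmpTrans : ∀ (spec : List (String × Int)), (∀ fd ∈ spec, fd.2 ≠ 0) →
    ∀ a b c, pyCompare spec a b < 0 → ¬ (pyCompare spec c b < 0) → pyCompare spec a c < 0 := by
  intro spec
  induction spec with
  | nil => intro _ a b c h; simp [pyCompare] at h
  | cons fd rest ih =>
    intro hspec a b c hab hcb
    obtain ⟨f, dval⟩ := fd
    have hd : dval ≠ 0 := hspec (f, dval) (by simp)
    have hrest : ∀ fd ∈ rest, fd.2 ≠ 0 := fun fd h => hspec fd (by simp [h])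
    rw [pvFieldIff f dval hd rest] at hab ⊢
    rw [pvFieldIff f dval hd rest] at hcb
    push Not at hcb
    rcases hab with hlt | ⟨heq, hr⟩
    · rcases lt_trichotomy (pvKey f dval c) (pvKey f dval b) with h1 | h1 | h1
      · exact absurd h1 (not_lt.mpr hcb.1)
      · exact Or.inl (h1 ▸ hlt)
      · exact Or.inl (lt_trans hlt h1)
    · rcases lt_trichotomy (pvKey f dval c) (pvKey f dval b) with h1 | h1 | h1
      · exact absurd h1 (not_lt.mpr hcb.1)
      · refine Or.inr ⟨heq.trans h1.symm, ih hrest a b c hr ?_⟩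
        exact not_lt.mpr (hcb.2 h1)
      · exact Or.inl (heq ▸ h1)

-- A's full comparator test is pvLex of the head key and the tail comparator
lemma pvFull_eq (f : String) (dval : Int) (hd : dval ≠ 0) (rest : List (String × Int)) :
    (fun a b => decide (pyCompare ((f, dval) :: rest) a b < 0))
      = pvLex (pvKey f dval) (fun a b => decide (pyCompare rest a b < 0)) := by
  funext a b
  rw [pvLex]
  rw [Bool.eq_iff_iff]
  simp only [decide_eq_true_eq, Bool.or_eq_true, Bool.and_eq_true]
  exact (pvFieldIff f dval hd rest a b).trans (by simp)

lemma pvSort_const_false {α : Type} (l : List α) :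
    pvSort (fun _ _ => false) l = l := by
  have key : ∀ v acc : List α, pvFold (fun _ _ => false) v acc = acc ++ v := by
    intro v
    induction v with
    | nil => simp [pvFold]
    | cons w v ih =>
      intro acc
      show pvFold _ v (PySem.List.insertBy _ w acc) = _
      rw [ih, PySem.List.insertBy_of_forall_not_before _ _ _ (fun _ _ => rfl)]
      simp
  simpa [pvSort, pvFold] using key l []

-- the top-level equivalence for specs whose directions are all nonzero
lemma pvTopStrict : ∀ (spec : List (String × Int)) (docs : List (List (String × Int))),
    (∀ fd ∈ spec, fd.2 ≠ 0) → apply_sort_py docs spec = apply_sort_py_alt docs spec := by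
  intro spec
  induction spec with
  | nil =>
    intro docs _
    show pvSort (fun a b => decide (pyCompare [] a b < 0)) docs = docs
    rw [show (fun (a b : List (String × Int)) => decide (pyCompare [] a b < 0)) = fun _ _ => false by
      funext a b; simp [pyCompare]]
    exact pvSort_const_false docs
  | cons fd rest ih =>
    intro docs hspec
    obtain ⟨f, dval⟩ := fd
    have hd : dval ≠ 0 := hspec (f, dval) (by simp)
    have hrest : ∀ fd ∈ rest, fd.2 ≠ 0 := fun fd h => hspec fd (by simp [h])
    have halt : apply_sort_py_alt docs ((f, dval) :: rest)
        = PySem.List.sorted2 (apply_sort_py_alt docs rest)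
            (fun d => ((PySem.Dict.mk d).get? f).isNone)
            (fun d => ((PySem.Dict.mk d).get? f).getD 0)
            (decide (dval < 0)) := by
      show (((f, dval) :: rest).reverse.foldl _ docs) = _
      rw [List.reverse_cons, List.foldl_append]
      rfl
    rw [halt, pvSorted2_eq f dval hd, ← ih docs hrest]
    show pvSort (fun a b => decide (pyCompare ((f, dval) :: rest) a b < 0)) docs
        = pvSort (pvBK (pvKey f dval)) (apply_sort_py docs rest)
    rw [pvFull_eq f dval hd rest]
    have H0 : ∀ a c : List (String × Int),
        (fun a b => decide (pyCompare rest a b < 0)) a c = true →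
        (fun a b => decide (pyCompare rest a b < 0)) c a = false := by
      intro a c h
      simp only [decide_eq_true_eq] at h
      simp only [decide_eq_false_iff_not, not_lt]
      rw [pvCmpNeg]
      omega
    have H1 : ∀ a c e : List (String × Int),
        (fun a b => decide (pyCompare rest a b < 0)) a c = true →
        (fun a b => decide (pyCompare rest a b < 0)) e c = false →
        (fun a b => decide (pyCompare rest a b < 0)) a e = true := by
      intro a c e h1 h2
      simp only [decide_eq_true_eq] at h1
      simp only [decide_eq_false_iff_not] at h2
      simp only [decide_eq_true_eq]
      exact pvCmpTrans rest hrest a c e h1 h2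
    exact pvMain (pvKey f dval) (fun a b => decide (pyCompare rest a b < 0)) H0 H1 docs

-- a no-op comparison function never moves anything
lemma pvIns_congr {α : Type} (b b' : α → α → Bool) (x : α) (ys : List α)
    (h : ∀ y ∈ ys, b x y = b' x y) : PySem.List.insertBy b x ys = PySem.List.insertBy b' x ys := by
  induction ys with
  | nil => rfl
  | cons y ys ih =>
    rw [pvIns_cons, pvIns_cons, h y (by simp), ih (fun z hz => h z (by simp [hz]))]

lemma pvFold_congr_mem {α : Type} (f g : α → α → Bool) :
    ∀ (v acc : List α), (∀ a ∈ v, ∀ b ∈ v, f a b = g a b) → (∀ a ∈ v, ∀ b ∈ acc, f a b = g a b) →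
    pvFold f v acc = pvFold g v acc := by
  intro v
  induction v with
  | nil => intros; rfl
  | cons x v ih =>
    intro acc hv hacc
    show pvFold f v (PySem.List.insertBy f x acc) = pvFold g v (PySem.List.insertBy g x acc)
    rw [pvIns_congr f g x acc (hacc x (by simp))]
    refine ih _ (fun a ha b hb => hv a (by simp [ha]) b (by simp [hb])) ?_
    intro a ha b hb
    rcases (PySem.List.mem_insertBy g x b acc).mp hb with rfl | hb
    · exact hv a (by simp [ha]) b (by simp)
    · exact hacc a (by simp [ha]) b hb

lemma pvSort_congr_mem {α : Type} (f g : α → α → Bool) (l : List α)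
    (h : ∀ a ∈ l, ∀ b ∈ l, f a b = g a b) : pvSort f l = pvSort g l :=
  pvFold_congr_mem f g l [] h (by simp)

lemma pvFold_id_of_false {α : Type} (bf : α → α → Bool) :
    ∀ (v acc : List α), (∀ a ∈ v, ∀ b, (b ∈ v ∨ b ∈ acc) → bf a b = false) →
    pvFold bf v acc = acc ++ v := by
  intro v
  induction v with
  | nil => intro acc _; simp [pvFold]
  | cons x v ih =>
    intro acc h
    show pvFold bf v (PySem.List.insertBy bf x acc) = acc ++ x :: v
    rw [PySem.List.insertBy_of_forall_not_before _ _ _ (fun y hy => h x (by simp) y (Or.inr hy))]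
    rw [ih (acc ++ [x]) ?_]
    · simp
    · intro a ha b hb
      rcases hb with hb | hb
      · exact h a (by simp [ha]) b (Or.inl (by simp [hb]))
      · rcases List.mem_append.mp hb with hb | hb
        · exact h a (by simp [ha]) b (Or.inr hb)
        · rcases List.mem_singleton.mp hb with rfl
          exact h a (by simp [ha]) b (Or.inl (by simp))

lemma pvSort_id_of_false {α : Type} (bf : α → α → Bool) (l : List α)
    (h : ∀ a ∈ l, ∀ b ∈ l, bf a b = false) : pvSort bf l = l := by
  have := pvFold_id_of_false bf l [] (fun a ha b hb => h a ha b (hb.resolve_right (by simp)))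
  simpa [pvSort, pvFold] using this

-- dropping the direction-0 fields does not change the comparator on documents that agree on them
lemma pvCmp_filter (a b : List (String × Int)) :
    ∀ spec : List (String × Int), (∀ fd ∈ spec, fd.2 = 0 → (PySem.Dict.mk a).get? fd.1 = (PySem.Dict.mk b).get? fd.1) →
    pyCompare spec a b = pyCompare (spec.filter (fun fd => fd.2 != 0)) a b := by
  intro spec
  induction spec with
  | nil => intro _; rfl
  | cons fd rest ih =>
    intro h
    obtain ⟨f, dval⟩ := fd
    by_cases hd : dval = 0
    · have heq : (PySem.Dict.mk a).get? f = (PySem.Dict.mk b).get? f := h (f, dval) (by simp) hd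
      have : pyCompare ((f, dval) :: rest) a b = pyCompare rest a b := by
        show (if (PySem.Dict.mk a).get? f = (PySem.Dict.mk b).get? f then pyCompare rest a b else _) = _
        rw [if_pos heq]
      rw [this, List.filter_cons_of_neg (by simp [hd]), ih (fun fd hfd h0 => h fd (by simp [hfd]) h0)]
    · rw [List.filter_cons_of_pos (by simp [hd])]
      show (if (PySem.Dict.mk a).get? f = (PySem.Dict.mk b).get? f then pyCompare rest a b else ?_) = (if (PySem.Dict.mk a).get? f = (PySem.Dict.mk b).get? f then pyCompare (rest.filter (fun fd => fd.2 != 0)) a b else ?_)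
      rw [ih (fun fd hfd h0 => h fd (by simp [hfd]) h0)]

-- B applied to one more field
lemma pvAlt_cons (docs : List (List (String × Int))) (fd : String × Int) (rest : List (String × Int)) :
    apply_sort_py_alt docs (fd :: rest)
      = PySem.List.sorted2 (apply_sort_py_alt docs rest)
          (fun d => ((PySem.Dict.mk d).get? fd.1).isNone)
          (fun d => (((PySem.Dict.mk d).get? fd.1).getD (0 : Int)))
          (decide (fd.2 < 0)) := by
  show ((fd :: rest).reverse.foldl _ docs) = _
  rw [List.reverse_cons, List.foldl_append]
  rfl

lemma pvAlt_mem (docs : List (List (String × Int))) :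
    ∀ (spec : List (String × Int)) (y : List (String × Int)),
      y ∈ apply_sort_py_alt docs spec ↔ y ∈ docs := by
  intro spec
  induction spec with
  | nil => intro y; exact Iff.rfl
  | cons fd rest ih =>
    intro y
    rw [pvAlt_cons, pvSorted2_before]
    cases hb : decide (fd.2 < 0) <;> rw [pvSort_mem] <;> exact ih y

-- a direction-0 pass over documents that agree on the field is a no-op for B
lemma pvAlt_filter (docs : List (List (String × Int))) :
    ∀ spec : List (String × Int),
      (∀ fd ∈ spec, fd.2 = 0 → ∀ d1 ∈ docs, ∀ d2 ∈ docs, (PySem.Dict.mk d1).get? fd.1 = (PySem.Dict.mk d2).get? fd.1) →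
      apply_sort_py_alt docs spec = apply_sort_py_alt docs (spec.filter (fun fd => fd.2 != 0)) := by
  intro spec
  induction spec with
  | nil => intro _; rfl
  | cons fd rest ih =>
    intro h
    have hrest : ∀ fd' ∈ rest, fd'.2 = 0 → ∀ d1 ∈ docs, ∀ d2 ∈ docs, (PySem.Dict.mk d1).get? fd'.1 = (PySem.Dict.mk d2).get? fd'.1 :=
      fun fd' hfd' => h fd' (List.mem_cons_of_mem _ hfd')
    by_cases hd : fd.2 = 0
    · rw [List.filter_cons_of_neg (by simp [hd]), ← ih hrest, pvAlt_cons, pvSorted2_before]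
      rw [show decide (fd.2 < 0) = false by simp [hd]]
      refine pvSort_id_of_false _ _ ?_
      intro a ha b hb
      have heq := h fd (by simp) hd a ((pvAlt_mem docs rest a).mp ha) b ((pvAlt_mem docs rest b).mp hb)
      simp [heq]
    · rw [List.filter_cons_of_pos (by simp [hd]), pvAlt_cons, pvAlt_cons, ih hrest]

-- the top-level equivalence under Pre_
lemma pvTop (docs : List (List (String × Int))) (spec : List (String × Int))
    (hpre : ∀ fd ∈ spec, fd.2 ≠ 0 ∨
      ∀ d1 ∈ docs, ∀ d2 ∈ docs, (PySem.Dict.mk d1).get? fd.1 = (PySem.Dict.mk d2).get? fd.1) :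
    apply_sort_py docs spec = apply_sort_py_alt docs spec := by
  have hall : ∀ fd ∈ spec, fd.2 = 0 → ∀ d1 ∈ docs, ∀ d2 ∈ docs, (PySem.Dict.mk d1).get? fd.1 = (PySem.Dict.mk d2).get? fd.1 := by
    intro fd hfd h0
    rcases hpre fd hfd with h | h
    · exact absurd h0 h
    · exact h
  have h1 : apply_sort_py docs spec = apply_sort_py docs (spec.filter (fun fd => fd.2 != 0)) := by
    refine pvSort_congr_mem _ _ docs ?_
    intro a ha b hb
    rw [pvCmp_filter a b spec (fun fd hfd h0 => hall fd hfd h0 a ha b hb)]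
  have h2 : ∀ fd ∈ spec.filter (fun fd => fd.2 != 0), fd.2 ≠ 0 := by
    intro fd hfd
    have := List.of_mem_filter hfd
    simpa using this
  rw [h1, pvTopStrict _ docs h2, ← pvAlt_filter docs spec hall]

-- ===== VERDICT (by name: the statement is the Claim_ definition above) =====
theorem apply_sort_py_spec : Claim_equal_apply_sort_py := by
  intro docs sort_spec _ hpre
  show apply_sort_py docs sort_spec = apply_sort_py_alt docs sort_spec
  exact pvTop docs sort_spec hpre
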